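-- pv_equiv track=rewrite | github.com/srvenient/diff-solve | flaskr/utils.py | replace_character
-- ===== SOURCE A (Python) =====
-- def replace_character(a: str) -> str:
--     """ Replace the characters in the string with the corresponding
--
--     These methods are designed to be an extension of the simplify methods,
--     since it does not recognize some expressions, such as y'.
--
--     :param a: The string to be replaced
--     :return: The string with the characters replaced
--     """
--     eq = list(a)
--     result = []
--     count = 0
--
--     while count < len(eq):
--         c = eq[count]
--
--         if c == 'y':
--             # Check if the next character is a prime symbol
--             if count + 1 < len(eq) and eq[count + 1] == "'":
--                 d, p = count + 1, 0
--                 while d < len(eq) and eq[d] == "'":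
--                     p += 1
--                     d += 1  # Count the number of prime symbols
--
--                 if d < len(eq) and eq[d] == '(':
--                     i = d + 1
--                     text = ""
--                     while i < len(eq) and eq[i] != ')':
--                         text += eq[i]
--                         i += 1
--
--                     result.append("Derivative(y, {}, {})".format(text, p))
--                     count = i + 1  # Move count past the closing parenthesis
--                 else:
--                     result.append("Derivative(y, x, {})".format(p))
--                     count = d  # Move count past the prime symbols
--                 continue
--
--             if count + 1 < len(eq) and eq[count + 1] == '(':
--                 i = count + 2
--                 text = ""
--                 while i < len(eq) and eq[i] != ')':
--                     text += eq[i]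
--                     i += 1
--                 result.append("Function(y)({})".format(text))
--                 count = i + 1  # Move count past the closing parenthesis
--                 continue
--
--             # If the character is not a prime symbol, add the variable to the token
--             result.append('y')
--         else:
--             result.append(c)
--
--         count += 1
--
--     return ''.join(result)
-- ===== SOURCE B (Python) =====
-- def replace_character(a: str) -> str:
--     """Idiomatic rewrite: consume the string suffix-by-suffix with str
--     primitives (lstrip for the prime run, partition for the paren body)
--     instead of index arithmetic over a char list."""
--     out = []
--     s = a
--     while s:
--         if s[0] == 'y' and s[1:2] == "'":
--             body = s[1:].lstrip("'")
--             p = len(s) - 1 - len(body)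
--             if body[:1] == '(':
--                 text, _, s = body[1:].partition(')')
--                 out.append("Derivative(y, {}, {})".format(text, p))
--             else:
--                 s = body
--                 out.append("Derivative(y, x, {})".format(p))
--         elif s[0] == 'y' and s[1:2] == '(':
--             text, _, s = s[2:].partition(')')
--             out.append("Function(y)({})".format(text))
--         else:
--             out.append(s[0])
--             s = s[1:]
--     return ''.join(out)
-- ===== Notes on version B (the rewrite author's own statement) =====
-- stated objective: idiomatic
-- what changed: Replaces A's index-arithmetic scan over a char list (with hand-written inner while loops and char-by-char accumulation) by suffix consumption with string primitives: lstrip for the prime run and partition for the (possibly unclosed) parenthesised body.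
import Mathlib
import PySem

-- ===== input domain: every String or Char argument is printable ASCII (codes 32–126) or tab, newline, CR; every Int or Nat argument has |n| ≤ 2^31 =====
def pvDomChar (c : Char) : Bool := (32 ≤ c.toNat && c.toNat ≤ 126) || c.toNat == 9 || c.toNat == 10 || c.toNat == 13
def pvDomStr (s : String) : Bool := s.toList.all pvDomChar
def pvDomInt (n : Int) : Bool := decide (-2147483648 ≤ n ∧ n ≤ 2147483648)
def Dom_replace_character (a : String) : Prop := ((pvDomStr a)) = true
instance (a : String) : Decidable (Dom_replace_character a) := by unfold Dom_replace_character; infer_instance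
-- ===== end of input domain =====

-- B rewrites A's index-based scan as suffix consumption with lstrip/partition-style primitives (objective: idiomatic).

-- ===== PORT A =====
-- inner while loop counting prime symbols: returns (p, d) after the loop
def pvPrimesA (eq : List Char) (d : Nat) (p : Nat) : Nat × Nat :=
  if hlt : d < eq.length ∧ eq[d]! = '\'' then
    pvPrimesA eq (d + 1) (p + 1)
  else (p, d)
termination_by eq.length - d
decreasing_by exact Nat.sub_succ_lt_self _ _ hlt.1

-- inner while loop collecting text up to ')': returns (text, i) after the loop
def pvTextA (eq : List Char) (i : Nat) (text : List Char) : List Char × Nat :=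
  if hlt : i < eq.length ∧ eq[i]! ≠ ')' then
    pvTextA eq (i + 1) (text ++ [eq[i]!])
  else (text, i)
termination_by eq.length - i
decreasing_by exact Nat.sub_succ_lt_self _ _ hlt.1

-- helper facts the main loop's termination cites
theorem pvPrimesA_ge (eq : List Char) (d p : Nat) : d ≤ (pvPrimesA eq d p).2 := by
  fun_induction pvPrimesA with
  | case1 => omega
  | case2 => simp

theorem pvTextA_ge (eq : List Char) (i : Nat) (text : List Char) : i ≤ (pvTextA eq i text).2 := by
  fun_induction pvTextA with
  | case1 => omega
  | case2 => simp

theorem pvLA_dec1 (eq : List Char) (count : Nat) (h : count < eq.length) :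
    eq.length - ((pvTextA eq ((pvPrimesA eq (count + 1) 0).2 + 1) []).2 + 1) < eq.length - count := by
  have h1 := pvPrimesA_ge eq (count + 1) 0
  have h2 := pvTextA_ge eq ((pvPrimesA eq (count + 1) 0).2 + 1) []
  omega

theorem pvLA_dec2 (eq : List Char) (count : Nat) (h : count < eq.length) :
    eq.length - (pvPrimesA eq (count + 1) 0).2 < eq.length - count := by
  have h1 := pvPrimesA_ge eq (count + 1) 0
  omega

theorem pvLA_dec3 (eq : List Char) (count : Nat) (h : count < eq.length) :
    eq.length - ((pvTextA eq (count + 2) []).2 + 1) < eq.length - count := by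
  have h2 := pvTextA_ge eq (count + 2) []
  omega

-- the main while loop of A
def pvLoopA (eq : List Char) (count : Nat) (result : List String) : List String :=
  if h : count < eq.length then
    let c := eq[count]
    if c = 'y' then
      if count + 1 < eq.length ∧ eq[count + 1]! = '\'' then
        let pd := pvPrimesA eq (count + 1) 0
        if pd.2 < eq.length ∧ eq[pd.2]! = '(' then
          let ti := pvTextA eq (pd.2 + 1) []
          pvLoopA eq (ti.2 + 1)
            (result ++ ["Derivative(y, " ++ String.ofList ti.1 ++ ", " ++ toString pd.1 ++ ")"])
        else
          pvLoopA eq pd.2 (result ++ ["Derivative(y, x, " ++ toString pd.1 ++ ")"])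
      else if count + 1 < eq.length ∧ eq[count + 1]! = '(' then
        let ti := pvTextA eq (count + 2) []
        pvLoopA eq (ti.2 + 1) (result ++ ["Function(y)(" ++ String.ofList ti.1 ++ ")"])
      else
        pvLoopA eq (count + 1) (result ++ ["y"])
    else
      pvLoopA eq (count + 1) (result ++ [String.ofList [c]])
  else result
termination_by eq.length - count
decreasing_by
  · exact pvLA_dec1 eq count h
  · exact pvLA_dec2 eq count h
  · exact pvLA_dec3 eq count h
  · exact Nat.sub_succ_lt_self _ _ h
  · exact Nat.sub_succ_lt_self _ _ h

def replace_character (a : String) : String :=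
  String.join (pvLoopA a.toList 0 [])

-- ===== PORT B =====
theorem pvLB_dec1 (rest : List Char) :
    ((((rest.dropWhile (· = '\'')).tail).dropWhile (· ≠ ')')).drop 1).length < rest.length + 1 := by
  have hb := List.length_dropWhile_le (p := fun x => decide (x = '\'')) (l := rest)
  have ht : (rest.dropWhile (· = '\'')).tail.length ≤ (rest.dropWhile (· = '\'')).length := by
    cases rest.dropWhile (· = '\'') <;> simp
  have hd := List.length_dropWhile_le (p := fun x => decide (x ≠ ')')) (l := (rest.dropWhile (· = '\'')).tail)
  have hdr : ((((rest.dropWhile (· = '\'')).tail).dropWhile (· ≠ ')')).drop 1).length ≤ (((rest.dropWhile (· = '\'')).tail).dropWhile (· ≠ ')')).length := by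
    simp
  omega

theorem pvLB_dec2 (rest : List Char) : (rest.dropWhile (· = '\'')).length < rest.length + 1 := by
  have hb := List.length_dropWhile_le (p := fun x => decide (x = '\'')) (l := rest)
  omega

theorem pvLB_dec3 (rest : List Char) :
    (((rest.tail).dropWhile (· ≠ ')')).drop 1).length < rest.length + 1 := by
  have ht : rest.tail.length ≤ rest.length := by cases rest <;> simp
  have hd := List.length_dropWhile_le (p := fun x => decide (x ≠ ')')) (l := rest.tail)
  have hdr : (((rest.tail).dropWhile (· ≠ ')')).drop 1).length ≤ ((rest.tail).dropWhile (· ≠ ')')).length := by simp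
  omega

-- B's while loop: consumes the remaining suffix s
def pvLoopB (s : List Char) (out : List String) : List String :=
  match s with
  | [] => out
  | c :: rest =>
    if c = 'y' ∧ rest.head? = some '\'' then
      let body := rest.dropWhile (· = '\'')
      let p := (c :: rest).length - 1 - body.length
      if body.head? = some '(' then
        let text := body.tail.takeWhile (· ≠ ')')
        pvLoopB ((body.tail.dropWhile (· ≠ ')')).drop 1)
          (out ++ ["Derivative(y, " ++ String.ofList text ++ ", " ++ toString p ++ ")"])
      else
        pvLoopB body (out ++ ["Derivative(y, x, " ++ toString p ++ ")"])
    else if c = 'y' ∧ rest.head? = some '(' then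
      let text := rest.tail.takeWhile (· ≠ ')')
      pvLoopB ((rest.tail.dropWhile (· ≠ ')')).drop 1)
        (out ++ ["Function(y)(" ++ String.ofList text ++ ")"])
    else
      pvLoopB rest (out ++ [String.ofList [c]])
termination_by s.length
decreasing_by
  · exact pvLB_dec1 rest
  · exact pvLB_dec2 rest
  · exact pvLB_dec3 rest
  · exact Nat.lt_succ_self _

def replace_character_alt (a : String) : String :=
  String.join (pvLoopB a.toList [])

-- ===== PRECONDITION & SPEC =====
def Spec_replace_character (a : String) (out : String) : Prop := out = replace_character_alt a
instance (a : String) (out : String) : Decidable (Spec_replace_character a out) := by unfold Spec_replace_character; infer_instance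

-- ===== CLAIM (what is proved, stated in full; the proofs are below) =====
def Claim_equal_replace_character : Prop := ∀ (a : String), Dom_replace_character a → Spec_replace_character a (replace_character a)

-- ===== LEMMAS AND PROOFS =====

-- dropWhile is drop of the takeWhile length
theorem pvDropWhile_eq_drop {α : Type} (p : α → Bool) (l : List α) :
    l.dropWhile p = l.drop (l.takeWhile p).length := by
  induction l with
  | nil => rfl
  | cons a t ih => by_cases h : p a <;> simp [List.dropWhile, List.takeWhile, h, ih]

-- head? of a suffix, phrased as A's bound-plus-getElem! test
theorem pvHead?_drop_iff (eq : List Char) (n : Nat) (x : Char) :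
    (eq.drop n).head? = some x ↔ (n < eq.length ∧ eq[n]! = x) := by
  rw [List.head?_drop]
  constructor
  · intro h
    have hn : n < eq.length := by
      by_contra hc
      rw [List.getElem?_eq_none (by omega)] at h
      simp at h
    refine ⟨hn, ?_⟩
    rw [List.getElem?_eq_getElem hn] at h
    rw [getElem!_pos eq n hn]
    exact Option.some.inj h
  · rintro ⟨hn, hx⟩
    rw [List.getElem?_eq_getElem hn]
    rw [getElem!_pos eq n hn] at hx
    exact congrArg some hx

theorem pvPrimesA_spec (eq : List Char) (d p : Nat) :
    pvPrimesA eq d p =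
      (p + ((eq.drop d).takeWhile (· = '\'')).length,
       d + ((eq.drop d).takeWhile (· = '\'')).length) := by
  fun_induction pvPrimesA with
  | case1 d p h ih =>
    obtain ⟨hd, hx⟩ := h
    rw [List.drop_eq_getElem_cons hd]
    rw [getElem!_pos eq d hd] at hx
    simp only [List.takeWhile_cons, hx, decide_true, if_true, List.length_cons, ih,
      Prod.mk.injEq]
    omega
  | case2 d p h =>
    by_cases hd : d < eq.length
    · have hx : ¬ eq[d]! = '\'' := fun hc => h ⟨hd, hc⟩
      rw [List.drop_eq_getElem_cons hd]
      rw [getElem!_pos eq d hd] at hx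
      simp [List.takeWhile_cons, hx]
    · rw [List.drop_eq_nil_of_le (by omega)]
      simp

theorem pvTextA_spec (eq : List Char) (i : Nat) (text : List Char) :
    pvTextA eq i text =
      (text ++ (eq.drop i).takeWhile (· ≠ ')'),
       i + ((eq.drop i).takeWhile (· ≠ ')')).length) := by
  fun_induction pvTextA with
  | case1 i text h ih =>
    obtain ⟨hi, hx⟩ := h
    have hg : eq[i]! = eq[i] := getElem!_pos eq i hi
    rw [getElem!_pos eq i hi] at hx
    have hstep : (eq.drop i).takeWhile (· ≠ ')') =
        eq[i] :: (eq.drop (i + 1)).takeWhile (· ≠ ')') := by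
      rw [List.drop_eq_getElem_cons hi, List.takeWhile_cons, if_pos (by simp [hx])]
    rw [ih, hstep]
    simp [hg, Prod.mk.injEq]
    omega
  | case2 i text h =>
    by_cases hi : i < eq.length
    · have hx : eq[i]! = ')' := by
        by_contra hc
        exact h ⟨hi, hc⟩
      rw [List.drop_eq_getElem_cons hi]
      rw [getElem!_pos eq i hi] at hx
      simp [List.takeWhile_cons, hx]
    · rw [List.drop_eq_nil_of_le (by omega)]
      simp

theorem pvTakeWhile_len_le {α : Type} (p : α → Bool) (l : List α) :
    (l.takeWhile p).length ≤ l.length := by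
  induction l with
  | nil => simp
  | cons a t ih => by_cases h : p a <;> simp [h] <;> omega

theorem pvLoop_agree (eq : List Char) (n : Nat) (out : List String) :
    pvLoopA eq n out = pvLoopB (eq.drop n) out := by
  fun_induction pvLoopA with
  | case1 n out h c hy h1 pd h2 ti ih =>
    obtain ⟨hn1, hq⟩ := h1
    obtain ⟨hd, hpar⟩ := h2
    set k := ((eq.drop (n + 1)).takeWhile (· = '\'')).length with hkdef
    have hkle : k ≤ eq.length - (n + 1) := by
      simpa [← hkdef] using pvTakeWhile_len_le (· = '\'') (eq.drop (n + 1))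
    have hp : pd = (0 + k, n + 1 + k) := pvPrimesA_spec eq (n + 1) 0
    have hd2 : pd.2 = n + 1 + k := by rw [hp]
    have hd1 : pd.1 = k := by rw [hp]; simp
    rw [hd2] at hd hpar
    have hti : ti = ([] ++ (eq.drop (pd.2 + 1)).takeWhile (· ≠ ')'),
        pd.2 + 1 + ((eq.drop (pd.2 + 1)).takeWhile (· ≠ ')')).length) := pvTextA_spec eq (pd.2 + 1) []
    rw [hd2] at hti
    have ht1 : ti.1 = (eq.drop (n + 1 + k + 1)).takeWhile (· ≠ ')') := by rw [hti]; simp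
    have ht2 : ti.2 = n + 1 + k + 1 + ((eq.drop (n + 1 + k + 1)).takeWhile (· ≠ ')')).length := by
      rw [hti]
    have hbody : (eq.drop (n + 1)).dropWhile (· = '\'') = eq.drop (n + 1 + k) := by
      rw [pvDropWhile_eq_drop, ← hkdef, List.drop_drop]
    rw [ih, ht1, ht2, hd1, List.drop_eq_getElem_cons h, pvLoopB,
      if_pos ⟨hy, (pvHead?_drop_iff eq (n + 1) '\'').2 ⟨hn1, hq⟩⟩, hbody,
      if_pos ((pvHead?_drop_iff eq (n + 1 + k) '(').2 ⟨hd, hpar⟩), List.tail_drop]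
    have hplen : (eq[n] :: eq.drop (n + 1)).length - 1 - (eq.drop (n + 1 + k)).length = k := by
      simp only [List.length_cons, List.length_drop]
      omega
    rw [hplen]
    congr 1
    rw [pvDropWhile_eq_drop, List.drop_drop, List.drop_drop]
    congr 1
  | case2 n out h c hy h1 pd h2 ih =>
    obtain ⟨hn1, hq⟩ := h1
    set k := ((eq.drop (n + 1)).takeWhile (· = '\'')).length with hkdef
    have hkle : k ≤ eq.length - (n + 1) := by
      simpa [← hkdef] using pvTakeWhile_len_le (· = '\'') (eq.drop (n + 1))
    have hp : pd = (0 + k, n + 1 + k) := pvPrimesA_spec eq (n + 1) 0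
    have hd2 : pd.2 = n + 1 + k := by rw [hp]
    have hd1 : pd.1 = k := by rw [hp]; simp
    rw [hd2] at h2
    have hbody : (eq.drop (n + 1)).dropWhile (· = '\'') = eq.drop (n + 1 + k) := by
      rw [pvDropWhile_eq_drop, ← hkdef, List.drop_drop]
    rw [ih, hd1, hd2, List.drop_eq_getElem_cons h, pvLoopB,
      if_pos ⟨hy, (pvHead?_drop_iff eq (n + 1) '\'').2 ⟨hn1, hq⟩⟩, hbody,
      if_neg (fun hc => h2 ((pvHead?_drop_iff eq (n + 1 + k) '(').1 hc))]
    have hplen : (eq[n] :: eq.drop (n + 1)).length - 1 - (eq.drop (n + 1 + k)).length = k := by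
      simp only [List.length_cons, List.length_drop]
      omega
    rw [hplen]
  | case3 n out h c hy h1 h2 ti ih =>
    obtain ⟨hn1, hpar⟩ := h2
    have hti : ti = ([] ++ (eq.drop (n + 2)).takeWhile (· ≠ ')'),
        n + 2 + ((eq.drop (n + 2)).takeWhile (· ≠ ')')).length) := pvTextA_spec eq (n + 2) []
    have ht1 : ti.1 = (eq.drop (n + 2)).takeWhile (· ≠ ')') := by rw [hti]; simp
    have ht2 : ti.2 = n + 2 + ((eq.drop (n + 2)).takeWhile (· ≠ ')')).length := by rw [hti]
    rw [ih, ht1, ht2, List.drop_eq_getElem_cons h, pvLoopB,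
      if_neg (fun hc => h1 ((pvHead?_drop_iff eq (n + 1) '\'').1 hc.2)),
      if_pos ⟨hy, (pvHead?_drop_iff eq (n + 1) '(').2 ⟨hn1, hpar⟩⟩, List.tail_drop]
    congr 1
    rw [pvDropWhile_eq_drop, List.drop_drop, List.drop_drop]
    congr 1
  | case4 n out h c hy h1 h2 ih =>
    have hy' : eq[n] = 'y' := hy
    rw [ih, List.drop_eq_getElem_cons h, pvLoopB,
      if_neg (fun hc => h1 ((pvHead?_drop_iff eq (n + 1) '\'').1 hc.2)),
      if_neg (fun hc => h2 ((pvHead?_drop_iff eq (n + 1) '(').1 hc.2)), hy']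
  | case5 n out h c hy ih =>
    rw [ih, List.drop_eq_getElem_cons h, pvLoopB]
    rw [if_neg (fun hc => hy hc.1), if_neg (fun hc => hy hc.1)]
  | case6 n out h =>
    rw [List.drop_eq_nil_of_le (by omega)]
    simp [pvLoopB]

-- ===== VERDICT (by name: the statement is the Claim_ definition above) =====
theorem replace_character_spec : Claim_equal_replace_character := by
  intro a _
  unfold Spec_replace_character replace_character replace_character_alt
  rw [pvLoop_agree]
  simp
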